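-- pv_equiv track=rewrite | github.com/chrismurf/aoc-2024 | day-12/day-12.py | fill_region
-- ===== SOURCE A (Python) =====
-- RC = tuple[int, int]
--
-- RIGHT: RC = (0, 1)
--
-- DOWN: RC = (1, 0)
--
-- LEFT: RC = (0, -1)
--
-- UP: RC = (-1, 0)
--
-- def fill_region(
--         garden: dict[RC, str],
--         counted: dict[RC, bool],
--         r0: int,
--         c0: int
-- ) -> tuple[set[RC], int, set[RC]]:
--
--     edges = set()
--     veggie = garden[(r0, c0)]
--
--     region = set()
--     new_cells = {(r0, c0)}
--     while new_cells:
--         region = region.union(new_cells)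
--         next_new_cells = set()
--         for r, c in new_cells:
--             counted[(r,c)] = True
--             for (dr, dc) in [RIGHT, DOWN, LEFT, UP]:
--                 if garden.get((r+dr, c+dc), None) == veggie:
--                     if not counted.get((r+dr, c+dc), True):
--                         counted[(r+dr, c+dc)] = True
--                         next_new_cells.add((r+dr, c+dc))
--                 else:
--                     edges.add(((dr, dc), r, c))
--         new_cells = next_new_cells
--     return edges, region
-- ===== SOURCE B (Python) =====
-- def fill_region(garden, counted, r0, c0):
--     # Phase 1: flood fill with an index-scanned worklist, collecting the region
--     # in discovery order and marking `counted` (same in-place mutation as A).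
--     veggie = garden[(r0, c0)]
--     dirs = ((0, 1), (1, 0), (0, -1), (-1, 0))
--     region = [(r0, c0)]
--     i = 0
--     while i < len(region):
--         r, c = region[i]
--         i += 1
--         counted[(r, c)] = True
--         for dr, dc in dirs:
--             nbr = (r + dr, c + dc)
--             if garden.get(nbr) == veggie and not counted.get(nbr, True):
--                 counted[nbr] = True
--                 region.append(nbr)
--     # Phase 2: boundary extraction is independent of the traversal — an edge
--     # exists for every (cell, direction) whose neighbour is not the veggie.
--     edges = {((dr, dc), r, c)
--              for r, c in region
--              for dr, dc in dirs
--              if garden.get((r + dr, c + dc)) != veggie}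
--     return edges, set(region)
-- ===== Notes on version B (the rewrite author's own statement) =====
-- stated objective: alternative
-- what changed: A interleaves everything in one level-set BFS (frontier sets merged by unions, edges collected inside the flood loop); B separates concerns: a single index-scanned worklist computes the region, then boundary edges are extracted in an independent second pass over the region.
import Mathlib
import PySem

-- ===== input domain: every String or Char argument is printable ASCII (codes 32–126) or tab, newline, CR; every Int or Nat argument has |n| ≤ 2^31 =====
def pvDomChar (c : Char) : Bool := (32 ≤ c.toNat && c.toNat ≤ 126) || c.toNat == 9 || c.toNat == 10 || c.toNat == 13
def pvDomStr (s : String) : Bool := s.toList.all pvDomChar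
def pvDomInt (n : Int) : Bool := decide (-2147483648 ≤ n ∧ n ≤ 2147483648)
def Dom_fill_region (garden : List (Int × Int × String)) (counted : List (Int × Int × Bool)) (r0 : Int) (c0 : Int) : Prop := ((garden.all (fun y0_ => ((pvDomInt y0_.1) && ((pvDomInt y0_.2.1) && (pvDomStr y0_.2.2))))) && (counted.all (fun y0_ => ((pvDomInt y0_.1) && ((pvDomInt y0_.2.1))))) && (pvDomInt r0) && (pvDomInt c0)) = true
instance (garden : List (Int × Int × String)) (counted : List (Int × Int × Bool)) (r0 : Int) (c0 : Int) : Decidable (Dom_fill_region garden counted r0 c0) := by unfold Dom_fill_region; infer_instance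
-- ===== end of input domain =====

-- A interleaves edge collection inside a level-set BFS; B separates concerns: an index-scanned
-- worklist computes the region, then edges are extracted in an independent second pass over it.
-- The claim is about the return value only: both A and B also mutate `counted` in place, to the
-- same final contents.

-- ===== PORT A =====
-- the four directions RIGHT, DOWN, LEFT, UP
def pvDirs : List (Int × Int) := [(0, 1), (1, 0), (0, -1), (-1, 0)]

-- A's inner `for (dr, dc) in [RIGHT, DOWN, LEFT, UP]` body; state = (counted, next_new_cells, edges)
def aDirStep (g : PySem.Dict (Int × Int) String) (v : String) (p : Int × Int)
    (st : PySem.Dict (Int × Int) Bool × PySem.Set (Int × Int) × PySem.Set ((Int × Int) × Int × Int))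
    (d : Int × Int) :
    PySem.Dict (Int × Int) Bool × PySem.Set (Int × Int) × PySem.Set ((Int × Int) × Int × Int) :=
  let n : Int × Int := (p.1 + d.1, p.2 + d.2)
  if g.get? n == some v then
    if st.1.getD n true = false then (st.1.insert n true, PySem.Set.add st.2.1 n, st.2.2)
    else st
  else (st.1, st.2.1, PySem.Set.add st.2.2 (d, p.1, p.2))

-- A's `for r, c in new_cells` body: mark counted, then the four directions
def aCell (g : PySem.Dict (Int × Int) String) (v : String)
    (st : PySem.Dict (Int × Int) Bool × PySem.Set (Int × Int) × PySem.Set ((Int × Int) × Int × Int))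
    (p : Int × Int) :
    PySem.Dict (Int × Int) Bool × PySem.Set (Int × Int) × PySem.Set ((Int × Int) × Int × Int) :=
  pvDirs.foldl (aDirStep g v p) (st.1.insert p true, st.2.1, st.2.2)

-- A's `while new_cells` loop (fuel-bounded; counted.length + 3 levels always suffice)
def aLoop (fuel : Nat) (g : PySem.Dict (Int × Int) String) (v : String)
    (c : PySem.Dict (Int × Int) Bool) (edges : PySem.Set ((Int × Int) × Int × Int))
    (region : PySem.Set (Int × Int)) (newCells : PySem.Set (Int × Int)) :
    (List ((Int × Int) × Int × Int)) × (List (Int × Int)) :=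
  match fuel with
  | 0 => (edges, region)
  | fuel + 1 =>
    if newCells = [] then (edges, region)
    else
      let region := PySem.Set.union region newCells
      let st := newCells.foldl (aCell g v)
        (c, (PySem.Set.empty : PySem.Set (Int × Int)), edges)
      aLoop fuel g v st.1 st.2.2 region st.2.1

def fill_region (garden : List (Int × Int × String)) (counted : List (Int × Int × Bool)) (r0 : Int) (c0 : Int) : (List ((Int × Int) × Int × Int)) × (List (Int × Int)) :=
  let g := PySem.Dict.mk (garden.map (fun t => ((t.1, t.2.1), t.2.2)))
  match g.get? (r0, c0) with
  | none => ([], [])   -- Python raises KeyError here; excluded by Pre_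
  | some veggie =>
    aLoop (counted.length + 3) g veggie
      (PySem.Dict.mk (counted.map (fun t => ((t.1, t.2.1), t.2.2))))
      PySem.Set.empty PySem.Set.empty
      (PySem.Set.add PySem.Set.empty (r0, c0))

-- ===== PORT B =====
-- B phase 1, inner direction loop: only discovery, no edges; state = (counted, region worklist)
def bStep (g : PySem.Dict (Int × Int) String) (v : String) (p : Int × Int)
    (st : PySem.Dict (Int × Int) Bool × List (Int × Int)) (d : Int × Int) :
    PySem.Dict (Int × Int) Bool × List (Int × Int) :=
  let n : Int × Int := (p.1 + d.1, p.2 + d.2)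
  if g.get? n == some v && !(st.1.getD n true) then (st.1.insert n true, st.2 ++ [n]) else st

-- B phase 1, `while i < len(region)` (fuel-bounded; counted.length + 3 pops always suffice)
def bLoop (fuel : Nat) (g : PySem.Dict (Int × Int) String) (v : String)
    (region : List (Int × Int)) (i : Nat) (c : PySem.Dict (Int × Int) Bool) :
    PySem.Dict (Int × Int) Bool × List (Int × Int) :=
  match fuel with
  | 0 => (c, region)
  | fuel + 1 =>
    match region[i]? with
    | none => (c, region)
    | some p =>
      let st := pvDirs.foldl (bStep g v p) (c.insert p true, region)
      bLoop fuel g v st.2 (i + 1) st.1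

-- B phase 2: the edge-set comprehension, one region cell at a time
def bEdgeCell (g : PySem.Dict (Int × Int) String) (v : String)
    (e : PySem.Set ((Int × Int) × Int × Int)) (p : Int × Int) :
    PySem.Set ((Int × Int) × Int × Int) :=
  pvDirs.foldl
    (fun e d => if g.get? (p.1 + d.1, p.2 + d.2) == some v then e
                else PySem.Set.add e (d, p.1, p.2)) e

def fill_region_alt (garden : List (Int × Int × String)) (counted : List (Int × Int × Bool)) (r0 : Int) (c0 : Int) : (List ((Int × Int) × Int × Int)) × (List (Int × Int)) :=
  let g := PySem.Dict.mk (garden.map (fun t => ((t.1, t.2.1), t.2.2)))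
  match g.get? (r0, c0) with
  | none => ([], [])   -- Python raises KeyError here; excluded by Pre_
  | some veggie =>
    let res := bLoop (counted.length + 3) g veggie [(r0, c0)] 0
      (PySem.Dict.mk (counted.map (fun t => ((t.1, t.2.1), t.2.2))))
    (res.2.foldl (bEdgeCell g veggie) PySem.Set.empty, PySem.Set.ofList res.2)

-- ===== PRECONDITION & SPEC =====
-- Pre_ excludes exactly the inputs where `garden[(r0, c0)]` raises KeyError in Python A (and B).
def Pre_fill_region (garden : List (Int × Int × String)) (counted : List (Int × Int × Bool)) (r0 : Int) (c0 : Int) : Prop :=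
  (r0, c0) ∈ garden.map (fun t => (t.1, t.2.1))
instance (garden : List (Int × Int × String)) (counted : List (Int × Int × Bool)) (r0 : Int) (c0 : Int) : Decidable (Pre_fill_region garden counted r0 c0) := by unfold Pre_fill_region; infer_instance

def pvWitness_fill_region : (List (Int × Int × String)) × (List (Int × Int × Bool)) × Int × Int :=
  ([(0, 0, "A"), (0, 1, "A"), (1, 0, "B")], [((0 : Int), (1 : Int), false), ((1 : Int), (0 : Int), false)], 0, 0)

def Spec_fill_region (garden : List (Int × Int × String)) (counted : List (Int × Int × Bool)) (r0 : Int) (c0 : Int) (out : (List ((Int × Int) × Int × Int)) × (List (Int × Int))) : Prop := out = fill_region_alt garden counted r0 c0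
instance (garden : List (Int × Int × String)) (counted : List (Int × Int × Bool)) (r0 : Int) (c0 : Int) (out : (List ((Int × Int) × Int × Int)) × (List (Int × Int))) : Decidable (Spec_fill_region garden counted r0 c0 out) := by unfold Spec_fill_region; infer_instance

-- ===== CLAIM (what is proved, stated in full; the proofs are below) =====
def Claim_equal_fill_region : Prop := ∀ (garden : List (Int × Int × String)) (counted : List (Int × Int × Bool)) (r0 : Int) (c0 : Int), Dom_fill_region garden counted r0 c0 → Pre_fill_region garden counted r0 c0 → Spec_fill_region garden counted r0 c0 (fill_region garden counted r0 c0)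

-- ===== LEMMAS AND PROOFS =====

-- reference for one cell's direction sweep in A: (final counted, final edges, discovered cells)
def dref (g : PySem.Dict (Int × Int) String) (v : String) (p : Int × Int) :
    List (Int × Int) → PySem.Dict (Int × Int) Bool → PySem.Set ((Int × Int) × Int × Int) →
    PySem.Dict (Int × Int) Bool × PySem.Set ((Int × Int) × Int × Int) × List (Int × Int)
  | [], c, e => (c, e, [])
  | d :: ds, c, e =>
    let n : Int × Int := (p.1 + d.1, p.2 + d.2)
    if g.get? n == some v then
      if c.getD n true = false then
        let r := dref g v p ds (c.insert n true) e
        (r.1, r.2.1, n :: r.2.2)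
      else dref g v p ds c e
    else dref g v p ds c (PySem.Set.add e (d, p.1, p.2))

-- the edges contributed by cell p over the direction list ds
def edgesAux (g : PySem.Dict (Int × Int) String) (v : String) (p : Int × Int) :
    List (Int × Int) → List ((Int × Int) × Int × Int)
  | [] => []
  | d :: ds =>
    if g.get? (p.1 + d.1, p.2 + d.2) == some v then edgesAux g v p ds
    else (d, p.1, p.2) :: edgesAux g v p ds

lemma mem_edgesAux (g : PySem.Dict (Int × Int) String) (v : String) (p : Int × Int)
    (ds : List (Int × Int)) (x : (Int × Int) × Int × Int) (hx : x ∈ edgesAux g v p ds) :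
    x.2 = p ∧ x.1 ∈ ds := by
  induction ds with
  | nil => simp [edgesAux] at hx
  | cons d ds ih =>
    simp only [edgesAux] at hx
    split at hx
    · obtain ⟨h1, h2⟩ := ih hx; exact ⟨h1, by simp [h2]⟩
    · rcases List.mem_cons.mp hx with rfl | hx
      · exact ⟨rfl, by simp⟩
      · obtain ⟨h1, h2⟩ := ih hx; exact ⟨h1, by simp [h2]⟩

lemma getD_true_of_insert_true (c : PySem.Dict (Int × Int) Bool) (k x : Int × Int)
    (h : c.getD x true = true) : (c.insert k true).getD x true = true := by
  by_cases hx : x = k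
  · subst hx; exact PySem.Dict.getD_insert_self c x true true
  · rw [PySem.Dict.getD_insert_of_ne c true true hx]; exact h

lemma get?_false_of_insert_true (c : PySem.Dict (Int × Int) Bool) (k x : Int × Int)
    (h : (c.insert k true).get? x = some false) : c.get? x = some false := by
  by_cases hx : x = k
  · subst hx; rw [PySem.Dict.get?_insert_self c x true] at h; exact absurd h (by simp)
  · rwa [PySem.Dict.get?_insert_of_ne c true hx] at h

lemma getD_false_iff (c : PySem.Dict (Int × Int) Bool) (x : Int × Int) :
    c.getD x true = false ↔ c.get? x = some false := by
  show (c.get? x).getD true = false ↔ _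
  cases h : c.get? x <;> simp

lemma dref_facts (g : PySem.Dict (Int × Int) String) (v : String) (p : Int × Int)
    (ds : List (Int × Int)) (c : PySem.Dict (Int × Int) Bool)
    (e : PySem.Set ((Int × Int) × Int × Int)) :
    (∀ x, c.getD x true = true → (dref g v p ds c e).1.getD x true = true) ∧
    (∀ x, (dref g v p ds c e).1.get? x = some false → c.get? x = some false) ∧
    (∀ x ∈ (dref g v p ds c e).2.2, c.get? x = some false) ∧
    (∀ x ∈ (dref g v p ds c e).2.2, (dref g v p ds c e).1.getD x true = true) ∧
    (dref g v p ds c e).2.2.Nodup := by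
  induction ds generalizing c e with
  | nil => simp [dref]
  | cons d ds ih =>
    simp only [dref]
    split
    · split
      · rename_i hg hc
        obtain ⟨i1, i2, i3, i4, i5⟩ := ih (c.insert (p.1 + d.1, p.2 + d.2) true) e
        refine ⟨?_, ?_, ?_, ?_, ?_⟩
        · intro x hx
          exact i1 x (getD_true_of_insert_true _ _ _ hx)
        · intro x hx
          exact get?_false_of_insert_true _ _ _ (i2 x hx)
        · intro x hx
          simp only [List.mem_cons] at hx
          rcases hx with rfl | hx
          · exact (getD_false_iff c _).mp hc
          · have := i3 x hx
            have hne : x ≠ (p.1 + d.1, p.2 + d.2) := by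
              intro heq
              rw [heq, PySem.Dict.get?_insert_self c _ true] at this
              exact absurd this (by simp)
            rw [PySem.Dict.get?_insert_of_ne c true hne] at this
            exact this
        · intro x hx
          simp only [List.mem_cons] at hx
          rcases hx with rfl | hx
          · exact i1 _ (PySem.Dict.getD_insert_self c _ true true)
          · exact i4 x hx
        · refine List.Nodup.cons ?_ i5
          intro hmem
          have := i3 _ hmem
          rw [PySem.Dict.get?_insert_self c _ true] at this
          exact absurd this (by simp)
      · exact ih c e
    · exact ih c _

-- the edges component of dref is e ++ edgesAux when the new edges are fresh in e
lemma dref_edges (g : PySem.Dict (Int × Int) String) (v : String) (p : Int × Int)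
    (ds : List (Int × Int)) (c : PySem.Dict (Int × Int) Bool)
    (e : PySem.Set ((Int × Int) × Int × Int))
    (hnd : ds.Nodup) (hf : ∀ d ∈ ds, (d, p.1, p.2) ∉ e) :
    (dref g v p ds c e).2.1 = e ++ edgesAux g v p ds := by
  induction ds generalizing c e with
  | nil => simp [dref, edgesAux]
  | cons d ds ih =>
    simp only [dref, edgesAux]
    by_cases hg : (g.get? (p.1 + d.1, p.2 + d.2) == some v) = true
    · simp only [hg, if_true]
      split
      · exact ih _ _ (List.nodup_cons.mp hnd).2 (fun d' hd' => hf d' (by simp [hd']))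
      · exact ih _ _ (List.nodup_cons.mp hnd).2 (fun d' hd' => hf d' (by simp [hd']))
    · simp only [hg, Bool.false_eq_true, if_false]
      rw [PySem.Set.add_of_not_mem (hf d (by simp))]
      rw [ih c (e ++ [(d, p.1, p.2)]) (List.nodup_cons.mp hnd).2 ?_]
      · simp
      · intro d' hd' hm
        rcases List.mem_append.mp hm with hm | hm
        · exact hf d' (by simp [hd']) hm
        · simp only [List.mem_singleton, Prod.mk.injEq] at hm
          exact (List.nodup_cons.mp hnd).1 (hm.1 ▸ hd')

lemma foldl_aDirStep_eq (g : PySem.Dict (Int × Int) String) (v : String) (p : Int × Int)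
    (ds : List (Int × Int)) (c : PySem.Dict (Int × Int) Bool) (nx : PySem.Set (Int × Int))
    (e : PySem.Set ((Int × Int) × Int × Int)) (h : ∀ x ∈ nx, c.getD x true = true) :
    ds.foldl (aDirStep g v p) (c, nx, e) =
      ((dref g v p ds c e).1, nx ++ (dref g v p ds c e).2.2, (dref g v p ds c e).2.1) := by
  induction ds generalizing c nx e with
  | nil => simp [dref]
  | cons d ds ih =>
    simp only [List.foldl_cons, dref]
    by_cases hg : (g.get? (p.1 + d.1, p.2 + d.2) == some v) = true
    · by_cases hc : c.getD (p.1 + d.1, p.2 + d.2) true = false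
      · have hnotmem : (p.1 + d.1, p.2 + d.2) ∉ nx := by
          intro hm
          rw [h _ hm] at hc; exact absurd hc (by simp)
        have hstep : aDirStep g v p (c, nx, e) d =
            (c.insert (p.1 + d.1, p.2 + d.2) true, nx ++ [(p.1 + d.1, p.2 + d.2)], e) := by
          simp only [aDirStep, hg, hc, if_true]
          rw [PySem.Set.add_of_not_mem hnotmem]
        rw [hstep, ih _ _ _ (by
          intro x hx
          rcases List.mem_append.mp hx with hx | hx
          · exact getD_true_of_insert_true _ _ _ (h _ hx)
          · simp only [List.mem_singleton] at hx
            rw [hx]; exact PySem.Dict.getD_insert_self c _ true true)]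
        simp [hg, hc]
      · have hstep : aDirStep g v p (c, nx, e) d = (c, nx, e) := by
          simp [aDirStep, hg, hc]
        rw [hstep, ih _ _ _ h]
        simp [hg, hc]
    · have hstep : aDirStep g v p (c, nx, e) d = (c, nx, PySem.Set.add e (d, p.1, p.2)) := by
        simp [aDirStep, hg]
      rw [hstep, ih _ _ _ h]
      simp [hg]

-- B's direction sweep computes dref's counted and discoveries (edges do not occur in B's loop;
-- the e parameter of dref is arbitrary here)
lemma foldl_bStep_eq (g : PySem.Dict (Int × Int) String) (v : String) (p : Int × Int)
    (ds : List (Int × Int)) (c : PySem.Dict (Int × Int) Bool)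
    (e : PySem.Set ((Int × Int) × Int × Int)) (q : List (Int × Int)) :
    ds.foldl (bStep g v p) (c, q) =
      ((dref g v p ds c e).1, q ++ (dref g v p ds c e).2.2) := by
  induction ds generalizing c e q with
  | nil => simp [dref]
  | cons d ds ih =>
    simp only [List.foldl_cons, dref]
    by_cases hg : (g.get? (p.1 + d.1, p.2 + d.2) == some v) = true
    · by_cases hc : c.getD (p.1 + d.1, p.2 + d.2) true = false
      · have hstep : bStep g v p (c, q) d =
            (c.insert (p.1 + d.1, p.2 + d.2) true, q ++ [(p.1 + d.1, p.2 + d.2)]) := by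
          simp [bStep, hg, hc]
        rw [hstep, ih _ e]
        simp [hg, hc]
      · have hstep : bStep g v p (c, q) d = (c, q) := by
          simp [bStep, hg, hc]
        rw [hstep, ih _ e]
        simp [hg, hc]
    · have hstep : bStep g v p (c, q) d = (c, q) := by
        simp [bStep, hg]
      rw [hstep, ih _ (PySem.Set.add e (d, p.1, p.2))]
      simp [hg]

-- one cell of B's second pass, over a general direction list
lemma foldl_edge_eq (g : PySem.Dict (Int × Int) String) (v : String) (p : Int × Int)
    (ds : List (Int × Int)) (E : PySem.Set ((Int × Int) × Int × Int))
    (hnd : ds.Nodup) (hf : ∀ d ∈ ds, (d, p.1, p.2) ∉ E) :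
    ds.foldl (fun e d => if g.get? (p.1 + d.1, p.2 + d.2) == some v then e
              else PySem.Set.add e (d, p.1, p.2)) E = E ++ edgesAux g v p ds := by
  induction ds generalizing E with
  | nil => simp [edgesAux]
  | cons d ds ih =>
    simp only [List.foldl_cons, edgesAux]
    by_cases hg : (g.get? (p.1 + d.1, p.2 + d.2) == some v) = true
    · simp only [hg, if_true]
      exact ih E (List.nodup_cons.mp hnd).2 (fun d' hd' => hf d' (by simp [hd']))
    · simp only [hg, Bool.false_eq_true, if_false]
      rw [PySem.Set.add_of_not_mem (hf d (by simp))]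
      rw [ih (E ++ [(d, p.1, p.2)]) (List.nodup_cons.mp hnd).2 ?_]
      · simp
      · intro d' hd' hm
        rcases List.mem_append.mp hm with hm | hm
        · exact hf d' (by simp [hd']) hm
        · simp only [List.mem_singleton, Prod.mk.injEq] at hm
          exact (List.nodup_cons.mp hnd).1 (hm.1 ▸ hd')

-- B's second pass over a fresh nodup region list is the concatenation of per-cell edge lists
lemma foldl_bEdgeCell_eq (g : PySem.Dict (Int × Int) String) (v : String)
    (L : List (Int × Int)) (E : PySem.Set ((Int × Int) × Int × Int))
    (hnd : L.Nodup) (hfresh : ∀ p ∈ L, ∀ x ∈ E, x.2 ≠ p) :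
    L.foldl (bEdgeCell g v) E = E ++ L.flatMap (fun p => edgesAux g v p pvDirs) := by
  induction L generalizing E with
  | nil => simp
  | cons p L ih =>
    simp only [List.foldl_cons, List.flatMap_cons]
    have hcell : bEdgeCell g v E p = E ++ edgesAux g v p pvDirs := by
      refine foldl_edge_eq g v p pvDirs E (by decide) ?_
      intro d _ hm
      exact hfresh p (by simp) _ hm rfl
    rw [hcell, ih (E ++ edgesAux g v p pvDirs) (List.nodup_cons.mp hnd).2 ?_]
    · simp
    · intro q hq x hx
      rcases List.mem_append.mp hx with hx | hx
      · exact hfresh q (by simp [hq]) x hx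
      · have := (mem_edgesAux g v p pvDirs x hx).1
        rw [this]
        intro heq
        exact (List.nodup_cons.mp hnd).1 (heq ▸ hq)

lemma foldl_add_fresh (t : List (Int × Int)) : ∀ (s : List (Int × Int)),
    (∀ x ∈ t, x ∉ s) → t.Nodup → t.foldl PySem.Set.add s = s ++ t := by
  induction t with
  | nil => simp
  | cons a t ih =>
    intro s h hnd
    simp only [List.foldl_cons]
    rw [PySem.Set.add_of_not_mem (h a (by simp))]
    rw [ih (s ++ [a]) (by
      intro x hx hm
      rcases List.mem_append.mp hm with hm | hm
      · exact h x (by simp [hx]) hm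
      · simp only [List.mem_singleton] at hm
        exact (List.nodup_cons.mp hnd).1 (hm ▸ hx)) (List.nodup_cons.mp hnd).2]
    simp

lemma card_bound (L : List (Int × Int)) (s : Int × Int) (F : Finset (Int × Int))
    (hnd : L.Nodup) (h : ∀ x ∈ L, x = s ∨ x ∈ F) : L.length ≤ F.card + 1 := by
  have hsub : L.toFinset ⊆ insert s F := by
    intro x hx
    rcases h x (List.mem_toFinset.mp hx) with rfl | hx'
    · exact Finset.mem_insert_self _ _
    · exact Finset.mem_insert_of_mem hx'
  calc L.length = L.toFinset.card := (List.toFinset_card_of_nodup hnd).symm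
    _ ≤ (insert s F).card := Finset.card_le_card hsub
    _ ≤ F.card + 1 := Finset.card_insert_le _ _

lemma level_eq (g : PySem.Dict (Int × Int) String) (v : String) :
    ∀ (P D N : List (Int × Int)) (c : PySem.Dict (Int × Int) Bool)
      (e : PySem.Set ((Int × Int) × Int × Int)),
      (∀ x ∈ D, c.getD x true = true) → (∀ x ∈ N, c.getD x true = true) →
      (∀ x ∈ P.tail, c.getD x true = true) → (D ++ P ++ N).Nodup →
      (∀ x ∈ e, x.2 ∈ D) →
      ∃ c' disc,
        P.foldl (aCell g v) (c, N, e) =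
          (c', N ++ disc, e ++ P.flatMap (fun p => edgesAux g v p pvDirs)) ∧
        (∀ fb, bLoop (P.length + fb) g v (D ++ P ++ N) D.length c =
               bLoop fb g v (D ++ P ++ N ++ disc) (D ++ P).length c') ∧
        (∀ x ∈ D ++ P ++ N ++ disc, c'.getD x true = true) ∧
        (D ++ P ++ N ++ disc).Nodup ∧
        (∀ x ∈ disc, c.get? x = some false) ∧
        (∀ k, c'.get? k = some false → c.get? k = some false) := by
  intro P
  induction P with
  | nil =>
    intro D N c e hD hN hP hnd hE
    refine ⟨c, [], by simp, ?_, ?_, by simpa using hnd, by simp, fun k hk => hk⟩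
    · intro fb; simp
    · intro x hx
      simp only [List.append_nil, List.mem_append] at hx
      rcases hx with hx | hx
      · exact hD _ hx
      · exact hN _ hx
  | cons p ps ih =>
    intro D N c e hD hN hP hnd hE
    have hpD : p ∉ D := by
      intro hm
      rcases List.nodup_append.mp (List.nodup_append.mp hnd).1 with ⟨_, _, hdisj⟩
      exact hdisj _ hm _ (by simp) rfl
    -- process the head cell p
    set cin := c.insert p true with hcin
    set R := dref g v p pvDirs cin e with hR
    obtain ⟨f1, f2, f3, f4, f5⟩ := dref_facts g v p pvDirs cin e
    have hRedges : R.2.1 = e ++ edgesAux g v p pvDirs := by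
      rw [hR]
      refine dref_edges g v p pvDirs cin e (by decide) ?_
      intro d _ hm
      exact hpD (hE _ hm)
    have hcell : aCell g v (c, N, e) p = (R.1, N ++ R.2.2, e ++ edgesAux g v p pvDirs) := by
      show pvDirs.foldl (aDirStep g v p) (cin, N, e) = _
      rw [foldl_aDirStep_eq g v p pvDirs cin N e
        (fun x hx => getD_true_of_insert_true _ _ _ (hN x hx)), ← hR, hRedges]
    -- freshness of the discovered cells
    have hfreshc : ∀ x ∈ R.2.2, c.get? x = some false := by
      intro x hx
      have hf := f3 x hx
      have hne : x ≠ p := by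
        intro heq
        rw [heq, PySem.Dict.get?_insert_self c p true] at hf
        exact absurd hf (by simp)
      rwa [PySem.Dict.get?_insert_of_ne c true hne] at hf
    have hdpT : ∀ x ∈ R.2.2, c.getD x true = false :=
      fun x hx => (getD_false_iff c x).mpr (hfreshc x hx)
    have hdpD : ∀ x ∈ R.2.2, x ∉ D := fun x hx hm => by
      have := hD x hm; rw [hdpT x hx] at this; exact absurd this (by simp)
    have hdpN : ∀ x ∈ R.2.2, x ∉ N := fun x hx hm => by
      have := hN x hm; rw [hdpT x hx] at this; exact absurd this (by simp)
    have hdpps : ∀ x ∈ R.2.2, x ∉ ps := fun x hx hm => by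
      have := hP x hm; rw [hdpT x hx] at this; exact absurd this (by simp)
    have hdpp : ∀ x ∈ R.2.2, x ≠ p := fun x hx heq => by
      have hf := f3 x hx
      rw [heq, PySem.Dict.get?_insert_self c p true] at hf
      exact absurd hf (by simp)
    -- Nodup of the reshuffled list
    have hnd' : ((D ++ [p]) ++ ps ++ (N ++ R.2.2)).Nodup := by
      have h1 : ((D ++ [p]) ++ ps ++ (N ++ R.2.2)) = (D ++ (p :: ps) ++ N) ++ R.2.2 := by
        simp [List.append_assoc]
      rw [h1, List.nodup_append]
      refine ⟨hnd, f5, ?_⟩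
      intro x hx y hy heq
      rcases heq with rfl
      simp only [List.append_assoc, List.mem_append, List.mem_cons] at hx
      rcases hx with h | (h | h) | h
      · exact hdpD x hy h
      · exact hdpp x hy h
      · exact hdpps x hy h
      · exact hdpN x hy h
    -- invariants for the IH
    have hD' : ∀ x ∈ D ++ [p], R.1.getD x true = true := by
      intro x hx
      rcases List.mem_append.mp hx with h | h
      · exact f1 x (getD_true_of_insert_true _ _ _ (hD x h))
      · simp only [List.mem_singleton] at h
        rw [h]; exact f1 p (PySem.Dict.getD_insert_self c p true true)
    have hN' : ∀ x ∈ N ++ R.2.2, R.1.getD x true = true := by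
      intro x hx
      rcases List.mem_append.mp hx with h | h
      · exact f1 x (getD_true_of_insert_true _ _ _ (hN x h))
      · exact f4 x h
    have hP' : ∀ x ∈ ps.tail, R.1.getD x true = true := by
      intro x hx
      exact f1 x (getD_true_of_insert_true _ _ _ (hP x (List.mem_of_mem_tail hx)))
    have hE' : ∀ x ∈ e ++ edgesAux g v p pvDirs, x.2 ∈ D ++ [p] := by
      intro x hx
      rcases List.mem_append.mp hx with h | h
      · simp [hE x h]
      · simp [(mem_edgesAux g v p pvDirs x h).1]
    obtain ⟨c', disc', ha, hb, hT, hndf, hdisc, hcm⟩ :=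
      ih (D ++ [p]) (N ++ R.2.2) R.1 (e ++ edgesAux g v p pvDirs) hD' hN' hP' hnd' hE'
    refine ⟨c', R.2.2 ++ disc', ?_, ?_, ?_, ?_, ?_, ?_⟩
    · -- A side
      simp only [List.foldl_cons, hcell, ha, List.append_assoc, List.flatMap_cons]
    · -- B side
      intro fb
      have hfuel : (p :: ps).length + fb = (ps.length + fb) + 1 := by
        simp only [List.length_cons]; omega
      rw [hfuel]
      show bLoop ((ps.length + fb) + 1) g v (D ++ (p :: ps) ++ N) D.length c = _
      have hget : (D ++ (p :: ps) ++ N)[D.length]? = some p := by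
        rw [List.append_assoc, List.getElem?_append_right (le_refl D.length)]
        simp
      simp only [bLoop, hget]
      have hfold : pvDirs.foldl (bStep g v p) (c.insert p true, D ++ (p :: ps) ++ N) =
          (R.1, (D ++ (p :: ps) ++ N) ++ R.2.2) := by
        rw [← hcin, foldl_bStep_eq g v p pvDirs cin e, ← hR]
      rw [hfold]
      have hq : (D ++ (p :: ps) ++ N) ++ R.2.2 = (D ++ [p]) ++ ps ++ (N ++ R.2.2) := by
        simp [List.append_assoc]
      have hi : D.length + 1 = (D ++ [p]).length := by simp
      rw [hq, hi, hb fb]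
      congr 1 <;> simp [List.append_assoc]
    · intro x hx
      apply hT
      simp only [List.append_assoc, List.mem_append, List.mem_cons] at hx ⊢
      tauto
    · have heq2 : D ++ (p :: ps) ++ N ++ (R.2.2 ++ disc') = (D ++ [p]) ++ ps ++ ((N ++ R.2.2) ++ disc') := by
        simp [List.append_assoc]
      rw [heq2]
      have heq3 : (D ++ [p]) ++ ps ++ ((N ++ R.2.2) ++ disc') = D ++ [p] ++ ps ++ (N ++ R.2.2) ++ disc' := by
        simp [List.append_assoc]
      rw [heq3]; exact hndf
    · intro x hx
      rcases List.mem_append.mp hx with h | h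
      · exact hfreshc x h
      · have h1 := hdisc x h
        have h2 := f2 x h1
        exact get?_false_of_insert_true c p x h2
    · intro k hk
      exact get?_false_of_insert_true c p k (f2 k (hcm k hk))

def F0 (counted : List (Int × Int × Bool)) : Finset (Int × Int) :=
  ((counted.map (fun t => (t.1, t.2.1))).toFinset).filter
    (fun k => (PySem.Dict.mk (counted.map (fun t => ((t.1, t.2.1), t.2.2)))).get? k = some false)

lemma get?_mk_some_mem {ν : Type} (l : List ((Int × Int) × ν)) (k : Int × Int) (w : ν)
    (h : (PySem.Dict.mk l).get? k = some w) : k ∈ l.map Prod.fst := by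
  induction l with
  | nil =>
    rw [show (PySem.Dict.mk ([] : List ((Int × Int) × ν))).get? k = none from rfl] at h
    cases h
  | cons a l ih =>
    obtain ⟨ka, va⟩ := a
    rw [PySem.Dict.get?_mk_cons] at h
    by_cases hk : (ka == k) = true
    · simp only [List.map_cons, List.mem_cons]
      exact Or.inl (eq_of_beq hk).symm
    · simp only [hk, Bool.false_eq_true, if_false] at h
      simp only [List.map_cons, List.mem_cons]
      exact Or.inr (ih h)

lemma get?_mk_some_of_mem (l : List ((Int × Int) × String)) (k : Int × Int)
    (h : k ∈ l.map Prod.fst) : ∃ s, (PySem.Dict.mk l).get? k = some s := by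
  induction l with
  | nil => simp at h
  | cons a l ih =>
    obtain ⟨ka, va⟩ := a
    rw [PySem.Dict.get?_mk_cons]
    by_cases hk : (ka == k) = true
    · exact ⟨va, by simp [hk]⟩
    · simp only [hk, Bool.false_eq_true, if_false]
      apply ih
      simp only [List.map_cons, List.mem_cons] at h
      rcases h with heq | h
      · exact absurd (by simp [heq] : (ka == k) = true) hk
      · exact h

lemma mem_F0 (counted : List (Int × Int × Bool)) (x : Int × Int)
    (h : (PySem.Dict.mk (counted.map (fun t => ((t.1, t.2.1), t.2.2)))).get? x = some false) :
    x ∈ F0 counted := by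
  refine Finset.mem_filter.mpr ⟨List.mem_toFinset.mpr ?_, by simpa using h⟩
  have := get?_mk_some_mem _ x false h
  simpa [List.map_map, Function.comp] using this

lemma ofList_of_nodup (l : List (Int × Int)) (h : l.Nodup) : PySem.Set.ofList l = l := by
  have := foldl_add_fresh l [] (by simp) h
  simpa [PySem.Set.ofList_eq_foldl] using this

lemma union_of_nodup (s t : List (Int × Int)) (h : (s ++ t).Nodup) :
    PySem.Set.union s t = s ++ t := by
  rcases List.nodup_append.mp h with ⟨hs, ht, hdisj⟩
  have : PySem.Set.union s t = t.foldl PySem.Set.add s := rfl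
  rw [this, foldl_add_fresh t s (fun x hx hm => hdisj _ hm _ hx rfl) ht]

lemma main_eq (g : PySem.Dict (Int × Int) String) (v : String)
    (counted : List (Int × Int × Bool)) (seed : Int × Int) :
    ∀ (fa : Nat) (fb : Nat) (D P : List (Int × Int)) (c : PySem.Dict (Int × Int) Bool)
      (e : PySem.Set ((Int × Int) × Int × Int)),
      (∀ x ∈ D, c.getD x true = true) → (∀ x ∈ P.tail, c.getD x true = true) →
      (D ++ P).Nodup →
      (∀ x ∈ D ++ P, x = seed ∨ (PySem.Dict.mk (counted.map (fun t => ((t.1, t.2.1), t.2.2)))).get? x = some false) →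
      (∀ k, c.get? k = some false → (PySem.Dict.mk (counted.map (fun t => ((t.1, t.2.1), t.2.2)))).get? k = some false) →
      (∀ x ∈ e, x.2 ∈ D) →
      (F0 counted).card + 3 ≤ D.length + fa → (F0 counted).card + 3 ≤ D.length + fb →
      aLoop fa g v c e D P =
        (e ++ (((bLoop fb g v (D ++ P) D.length c).2).drop D.length).flatMap
          (fun p => edgesAux g v p pvDirs), (bLoop fb g v (D ++ P) D.length c).2) ∧
      (∃ T, (bLoop fb g v (D ++ P) D.length c).2 = (D ++ P) ++ T) ∧
      (bLoop fb g v (D ++ P) D.length c).2.Nodup := by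
  intro fa
  induction fa with
  | zero =>
    intro fb D P c e hD hP hnd hSC hCM hE hfa hfb
    exfalso
    have hlen : (D ++ P).length ≤ (F0 counted).card + 1 := by
      apply card_bound (D ++ P) seed (F0 counted) hnd
      intro x hx
      rcases hSC x hx with h | h
      · exact Or.inl h
      · exact Or.inr (mem_F0 counted x h)
    simp only [List.length_append] at hlen
    omega
  | succ fa ih =>
    intro fb D P c e hD hP hnd hSC hCM hE hfa hfb
    have hlen : (D ++ P).length ≤ (F0 counted).card + 1 := by
      apply card_bound (D ++ P) seed (F0 counted) hnd
      intro x hx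
      rcases hSC x hx with h | h
      · exact Or.inl h
      · exact Or.inr (mem_F0 counted x h)
    simp only [List.length_append] at hlen
    by_cases hPe : P = []
    · subst hPe
      simp only [List.append_nil] at hnd ⊢
      have hQ : (bLoop fb g v D D.length c).2 = D := by
        match fb with
        | 0 => simp [bLoop]
        | fb + 1 => simp [bLoop]
      refine ⟨?_, ⟨[], by simp [hQ]⟩, by rw [hQ]; exact hnd⟩
      rw [hQ]
      show aLoop (fa + 1) g v c e D [] = _
      simp [aLoop, List.drop_length]
    · -- nonempty level
      obtain ⟨c', disc, ha, hb, hT, hndf, hdisc, hcm⟩ :=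
        level_eq g v P D [] c e hD (by simp) hP (by simpa using hnd) hE
      have hPlen : 1 ≤ P.length := by
        cases P with
        | nil => exact absurd rfl hPe
        | cons a l => simp
      have hA : aLoop (fa + 1) g v c e D P =
          aLoop fa g v c' (e ++ P.flatMap (fun p => edgesAux g v p pvDirs)) (D ++ P) disc := by
        simp only [aLoop]
        rw [if_neg hPe]
        have hun : PySem.Set.union D P = D ++ P := union_of_nodup D P hnd
        have hst : P.foldl (aCell g v) (c, (PySem.Set.empty : PySem.Set (Int × Int)), e) =
            (c', disc, e ++ P.flatMap (fun p => edgesAux g v p pvDirs)) := by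
          have : ((PySem.Set.empty : PySem.Set (Int × Int))) = ([] : List (Int × Int)) := rfl
          rw [this]
          simpa using ha
        rw [hun, hst]
      have hndDP : (D ++ P ++ disc).Nodup := by simpa using hndf
      have hSC' : ∀ x ∈ (D ++ P) ++ disc, x = seed ∨ (PySem.Dict.mk (counted.map (fun t => ((t.1, t.2.1), t.2.2)))).get? x = some false := by
        intro x hx
        rcases List.mem_append.mp hx with h | h
        · exact hSC x h
        · exact Or.inr (hCM x (hdisc x h))
      have hE' : ∀ x ∈ e ++ P.flatMap (fun p => edgesAux g v p pvDirs), x.2 ∈ D ++ P := by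
        intro x hx
        rcases List.mem_append.mp hx with h | h
        · simp [hE x h]
        · obtain ⟨p, hp, hxp⟩ := List.mem_flatMap.mp h
          simp [(mem_edgesAux g v p pvDirs x hxp).1, hp]
      have hfb2 : P.length ≤ fb := by omega
      obtain ⟨ih1, ⟨T, ihT⟩, ihnd⟩ := ih (fb - P.length) (D ++ P) disc c'
        (e ++ P.flatMap (fun p => edgesAux g v p pvDirs))
        (by intro x hx; exact hT x (by simp [List.mem_append] at hx ⊢; tauto))
        (by intro x hx; exact hT x (by
              have : x ∈ disc := List.mem_of_mem_tail hx
              simp [List.mem_append] at this ⊢; tauto))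
        hndDP hSC'
        (fun k hk => hCM k (hcm k hk))
        hE'
        (by simp only [List.length_append]; omega)
        (by simp only [List.length_append]; omega)
      have hbfb := hb (fb - P.length)
      have hfuel : P.length + (fb - P.length) = fb := by omega
      rw [hfuel] at hbfb
      rw [show (D ++ P ++ [] : List (Int × Int)) = D ++ P by simp] at hbfb
      -- the queue of the outer bLoop equals that of the inner one
      have hQ : (bLoop fb g v (D ++ P) D.length c).2 =
          (bLoop (fb - P.length) g v ((D ++ P) ++ disc) (D ++ P).length c').2 := by
        rw [hbfb]
      constructor
      · rw [hA, ih1, hQ]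
        have hQval : (bLoop (fb - P.length) g v ((D ++ P) ++ disc) (D ++ P).length c').2 =
            (D ++ P) ++ (disc ++ T) := by
          rw [ihT]; simp [List.append_assoc]
        rw [hQval]
        have hdrop1 : (((D ++ P) ++ (disc ++ T)).drop D.length) = P ++ (disc ++ T) := by
          rw [show ((D ++ P) ++ (disc ++ T) : List (Int × Int)) = D ++ (P ++ (disc ++ T)) by
            simp [List.append_assoc]]
          exact List.drop_left
        have hdrop2 : (((D ++ P) ++ (disc ++ T)).drop (D ++ P).length) = disc ++ T := by
          exact List.drop_left
        rw [hdrop1, hdrop2]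
        simp [List.append_assoc]
      · refine ⟨?_, by rw [hQ]; exact ihnd⟩
        refine ⟨disc ++ T, ?_⟩
        rw [hQ, ihT]
        simp [List.append_assoc]

theorem fill_region_eq_alt (garden : List (Int × Int × String)) (counted : List (Int × Int × Bool)) (r0 : Int) (c0 : Int)
    (hpre : (r0, c0) ∈ garden.map (fun t => (t.1, t.2.1))) :
    fill_region garden counted r0 c0 = fill_region_alt garden counted r0 c0 := by
  have hmem : (r0, c0) ∈ (garden.map (fun t => ((t.1, t.2.1), t.2.2))).map Prod.fst := by
    simpa [List.map_map, Function.comp] using hpre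
  obtain ⟨v, hv⟩ := get?_mk_some_of_mem _ _ hmem
  unfold fill_region fill_region_alt
  simp only [hv]
  have hcard : (F0 counted).card ≤ counted.length := by
    calc (F0 counted).card ≤ (counted.map (fun t => (t.1, t.2.1))).toFinset.card :=
          Finset.card_filter_le _ _
      _ ≤ (counted.map (fun t => (t.1, t.2.1))).length := List.toFinset_card_le _
      _ = counted.length := List.length_map ..
  obtain ⟨h1, _hpref, hnd⟩ := main_eq (PySem.Dict.mk (garden.map (fun t => ((t.1, t.2.1), t.2.2)))) v counted (r0, c0)
    (counted.length + 3) (counted.length + 3) [] [(r0, c0)]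
    (PySem.Dict.mk (counted.map (fun t => ((t.1, t.2.1), t.2.2)))) PySem.Set.empty
    (by simp) (by simp) (by simp)
    (by intro x hx; simp at hx; exact Or.inl (by simp [hx]))
    (fun k hk => hk)
    (by intro x hx; simp [PySem.Set.empty] at hx)
    (by simp; omega) (by simp; omega)
  simp only [List.nil_append, List.length_nil, List.drop_zero] at h1 hnd
  set Q := (bLoop (counted.length + 3) (PySem.Dict.mk (garden.map (fun t => ((t.1, t.2.1), t.2.2)))) v
      [(r0, c0)] 0 (PySem.Dict.mk (counted.map (fun t => ((t.1, t.2.1), t.2.2))))).2 with hQdef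
  refine Eq.trans h1 ?_
  have hedges := foldl_bEdgeCell_eq (PySem.Dict.mk (garden.map (fun t => ((t.1, t.2.1), t.2.2)))) v Q
    PySem.Set.empty hnd (by intro p _ x hx; simp [PySem.Set.empty] at hx)
  rw [hedges, ofList_of_nodup Q hnd]

-- ===== VERDICT (by name: the statement is the Claim_ definition above) =====
theorem fill_region_spec : Claim_equal_fill_region := by
  intro garden counted r0 c0 _hdom hpre
  exact fill_region_eq_alt garden counted r0 c0 hpre
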